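-- pv_equiv track=rewrite | github.com/jeury301/python-morsels | 14. lstrip/lstrip_solutions.py | v0_lstrip
-- ===== SOURCE A (Python) =====
-- def v0_lstrip(iterable, strip_value):
--     """Return iterable with strip_value items removed from beginning."""
--     stripped = []
--     is_beginning = True
--     for item in iterable:
--         if is_beginning:
--             if item != strip_value:
--                 is_beginning = False
--             else:
--                 continue
--         stripped.append(item)
--     return stripped
-- ===== SOURCE B (Python) =====
-- def v0_lstrip(iterable, strip_value):
--     """Return iterable with strip_value items removed from beginning."""
--     items = list(iterable)
--     i = 0
--     while i < len(items) and items[i] == strip_value: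
--         i += 1
--     return items[i:]
-- ===== Notes on version B (the rewrite author's own statement) =====
-- stated objective: simpler
-- what changed: Replaces A's flag-and-append accumulation loop with finding the boundary index of the leading run and returning one slice.
import Mathlib
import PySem

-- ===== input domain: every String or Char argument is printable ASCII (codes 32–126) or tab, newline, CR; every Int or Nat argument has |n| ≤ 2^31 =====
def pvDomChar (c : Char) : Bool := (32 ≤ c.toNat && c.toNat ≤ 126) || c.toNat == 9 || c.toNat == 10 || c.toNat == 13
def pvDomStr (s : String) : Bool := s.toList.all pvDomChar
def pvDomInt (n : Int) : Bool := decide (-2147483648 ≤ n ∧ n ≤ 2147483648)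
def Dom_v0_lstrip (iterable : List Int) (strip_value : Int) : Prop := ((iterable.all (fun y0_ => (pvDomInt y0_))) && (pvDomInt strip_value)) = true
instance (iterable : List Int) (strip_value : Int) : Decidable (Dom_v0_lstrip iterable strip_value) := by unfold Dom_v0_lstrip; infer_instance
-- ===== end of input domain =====

-- B replaces A's flag-and-append accumulation with finding the boundary of the leading run and returning one slice (simpler, same cost).

-- ===== PORT A =====
-- A: single pass with accumulator `stripped` and flag `is_beginning`.
def pvStepA (strip_value : Int) (st : List Int × Bool) (item : Int) : List Int × Bool :=
  if st.2 then
    if item ≠ strip_value then (st.1 ++ [item], false)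
    else st
  else (st.1 ++ [item], st.2)

def v0_lstrip (iterable : List Int) (strip_value : Int) : List Int :=
  (iterable.foldl (pvStepA strip_value) ([], true)).1

-- ===== PORT B =====
-- B: scan index i forward while items[i] == strip_value, then return items[i:].
def pvBoundary (items : List Int) (strip_value : Int) : Nat :=
  match items with
  | [] => 0
  | x :: xs => if x = strip_value then pvBoundary xs strip_value + 1 else 0

def v0_lstrip_alt (iterable : List Int) (strip_value : Int) : List Int :=
  iterable.drop (pvBoundary iterable strip_value)

-- ===== PRECONDITION & SPEC =====
def Spec_v0_lstrip (iterable : List Int) (strip_value : Int) (out : List Int) : Prop := out = v0_lstrip_alt iterable strip_value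
instance (iterable : List Int) (strip_value : Int) (out : List Int) : Decidable (Spec_v0_lstrip iterable strip_value out) := by unfold Spec_v0_lstrip; infer_instance

-- ===== CLAIM (what is proved, stated in full; the proofs are below) =====
def Claim_equal_v0_lstrip : Prop := ∀ (iterable : List Int) (strip_value : Int), Dom_v0_lstrip iterable strip_value → Spec_v0_lstrip iterable strip_value (v0_lstrip iterable strip_value)

-- ===== LEMMAS AND PROOFS =====
-- Once the flag is false, A appends every remaining item.
theorem pv_fold_false (strip_value : Int) (l acc : List Int) :
    l.foldl (pvStepA strip_value)
      (acc, false) = (acc ++ l, false) := by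
  induction l generalizing acc with
  | nil => simp
  | cons x xs ih => rw [List.foldl_cons, show pvStepA strip_value (acc, false) x = (acc ++ [x], false) from rfl, ih]; simp

-- With the flag true, A's fold produces acc ++ (l minus its leading strip run).
theorem pv_fold_true (strip_value : Int) (l acc : List Int) :
    l.foldl (pvStepA strip_value)
      (acc, true) = (acc ++ l.drop (pvBoundary l strip_value), true) ∨
    l.foldl (pvStepA strip_value)
      (acc, true) = (acc ++ l.drop (pvBoundary l strip_value), false) := by
  induction l generalizing acc with
  | nil => left; simp
  | cons x xs ih =>
    by_cases hx : x = strip_value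
    · rw [List.foldl_cons, show pvStepA strip_value (acc, true) x = (acc, true) from by simp [pvStepA, hx]]
      simpa [pvBoundary, hx] using ih acc
    · right
      rw [List.foldl_cons, show pvStepA strip_value (acc, true) x = (acc ++ [x], false) from by simp [pvStepA, hx], pv_fold_false]
      simp [pvBoundary, hx]

-- ===== VERDICT (by name: the statement is the Claim_ definition above) =====
theorem v0_lstrip_spec : Claim_equal_v0_lstrip := by
  intro iterable strip_value _
  unfold Spec_v0_lstrip v0_lstrip v0_lstrip_alt
  rcases pv_fold_true strip_value iterable [] with h | h <;> simp [h]
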